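/- GENERATED by farm/mkstatement.py from design/units.tsv (unit `decode_residue.4a`) and the assertions of Vorbis/Spec/DecodeResidue46.lean — do not edit.
   THE STATEMENT of the proof unit `decode_residue.4a`: segment 4a of `decode_residue` (80 instructions; entries 0x10f2a3,0x10f2e6,0x10f1a7,0x10f1cf,0x10f260;
   exits 0x10ef70,0x10f2e6,0x10f6a0,0x10f1a7,0x10f2a3,0x10f1cf,0x10f260,0x10f141; ranges 0x10f19f-0x10f28b + 0x10f29c-0x10f2ec + 0x10f30c-0x10f30f)
   takes each of its entry assertions to one of its exit assertions (`Vorbis.Spec.DecodeResidue.Seg4a`), given the contracts of its callees.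
   What the names mean: Vorbis/Spec/Basic.lean (the shared hypotheses), Vorbis/Spec/DecodeResidue46.lean (the assertions). The theorem to prove:
   `theorem decode_residue_4a_ok : Vorbis.Spec.decode_residue_4a.Statement`. -/
import Vorbis.Spec.DecodeResidue46
namespace Vorbis.Spec.decode_residue_4a
open X86 X86.User Asan

/-- The statement of unit `decode_residue.4a`. -/
def Statement : Prop :=
  ∀ (Lay : Layout) (_hLay : Lay.hi = 0x1000000) (μ : Microarch) (_hμ : UserX.MicroOK μ) (u₀ : State)
    (_hcode : HasCodeNat Lay u₀ Vorbis.L.decode_residue.entry Vorbis.Code.code_decode_residue.nat Vorbis.L.decode_residue.size)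
    (_h_asan_load8_noabort : Asan.SmallCheck Lay μ Vorbis.WayInv (Vorbis.CodeOK u₀) [.rax, .rcx, .rdx] 8 Vorbis.L.__asan_load8_noabort.entry)
    (_h_asan_load4_noabort : Asan.SmallCheck Lay μ Vorbis.WayInv (Vorbis.CodeOK u₀) [.rax, .rcx, .rdx] 4 Vorbis.L.__asan_load4_noabort.entry)
    (_h_asan_load1_noabort : Asan.SmallCheck Lay μ Vorbis.WayInv (Vorbis.CodeOK u₀) [.rax, .rdx] 1 Vorbis.L.__asan_load1_noabort.entry)
    (_h_asan_load2_noabort : Asan.SmallCheck Lay μ Vorbis.WayInv (Vorbis.CodeOK u₀) [.rax, .rcx, .rdx] 2 Vorbis.L.__asan_load2_noabort.entry),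
    Vorbis.Spec.DecodeResidue.Seg4a Lay μ u₀

end Vorbis.Spec.decode_residue_4a
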